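-- pv_equiv track=rewrite | github.com/Helena-2222/fiction-generation-web | app/services/story_service.py | _chapter_targets
-- ===== SOURCE A (Python) =====
-- import math
-- from typing import Any, Dict, List, Optional, TypedDict
--
-- def _chapter_targets(total_words: int, chapter_words: int) -> List[int]:
--     chapter_count = max(1, math.ceil(total_words / chapter_words))
--     targets: List[int] = []
--     remaining = total_words
--
--     for _ in range(chapter_count):
--         target = min(chapter_words, remaining)
--         if target <= 0:
--             target = chapter_words
--         targets.append(target)
--         remaining -= target
--
--     return targets
-- ===== SOURCE B (Python) =====
-- import math
-- from typing import List
--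
--
-- def _chapter_targets(total_words: int, chapter_words: int) -> List[int]:
--     chapter_count = max(1, math.ceil(total_words / chapter_words))
--     last = min(chapter_words, total_words - (chapter_count - 1) * chapter_words)
--     if last <= 0:
--         last = chapter_words
--     return [chapter_words] * (chapter_count - 1) + [last]
-- ===== Notes on version B (the rewrite author's own statement) =====
-- stated objective: alternative
-- what changed: B computes only the final chapter's target in closed form and builds all earlier chapters by list repetition [chapter_words]*(n-1), eliminating A's per-chapter loop with its running 'remaining' accumulator and per-element min/branch.
import Mathlib
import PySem

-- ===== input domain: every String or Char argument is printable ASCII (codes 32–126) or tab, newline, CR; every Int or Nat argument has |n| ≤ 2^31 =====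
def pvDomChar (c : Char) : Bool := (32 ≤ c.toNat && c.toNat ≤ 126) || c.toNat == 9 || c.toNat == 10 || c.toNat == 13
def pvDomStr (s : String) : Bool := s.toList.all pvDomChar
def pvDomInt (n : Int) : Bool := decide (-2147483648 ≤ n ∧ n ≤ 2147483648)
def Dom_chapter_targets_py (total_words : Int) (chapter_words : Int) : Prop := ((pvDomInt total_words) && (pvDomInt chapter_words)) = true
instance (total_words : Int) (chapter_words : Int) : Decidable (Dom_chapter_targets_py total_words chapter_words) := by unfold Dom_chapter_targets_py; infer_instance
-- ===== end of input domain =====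

-- B replaces A's per-chapter loop (running `remaining`, min, branch) by one closed-form last
-- element plus list repetition for all earlier chapters; objective: alternative decomposition.

-- ===== PORT A =====
-- A's loop: count iterations, carrying the mutable `remaining`, appending each target.
def chapterLoopA (chapter_words : Int) : Nat → Int → List Int
  | 0, _ => []
  | n + 1, remaining =>
      let target := min chapter_words remaining
      let target' := if target ≤ 0 then chapter_words else target
      target' :: chapterLoopA chapter_words n (remaining - target')

-- math.ceil(total/chapter) on exact rationals = -((-total) // chapter); exact on Dom (|n| ≤ 2^31 < 2^53)
def chapter_targets_py (total_words : Int) (chapter_words : Int) : List Int :=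
  let chapter_count : Int := max 1 (-(PySem.Int.floordiv (-total_words) chapter_words))
  chapterLoopA chapter_words chapter_count.toNat total_words

-- ===== PORT B =====
def chapter_targets_py_alt (total_words : Int) (chapter_words : Int) : List Int :=
  let chapter_count : Int := max 1 (-(PySem.Int.floordiv (-total_words) chapter_words))
  let last := min chapter_words (total_words - (chapter_count - 1) * chapter_words)
  let last' := if last ≤ 0 then chapter_words else last
  List.replicate (chapter_count - 1).toNat chapter_words ++ [last']

-- ===== PRECONDITION & SPEC =====
-- Pre_ excludes chapter_words = 0, where Python A raises ZeroDivisionError (B raises there too).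
def Pre_chapter_targets_py (total_words : Int) (chapter_words : Int) : Prop := chapter_words ≠ 0
instance (total_words : Int) (chapter_words : Int) : Decidable (Pre_chapter_targets_py total_words chapter_words) := by unfold Pre_chapter_targets_py; infer_instance
def pvWitness_chapter_targets_py : Int × Int := (10, 4)

def Spec_chapter_targets_py (total_words : Int) (chapter_words : Int) (out : List Int) : Prop := out = chapter_targets_py_alt total_words chapter_words
instance (total_words : Int) (chapter_words : Int) (out : List Int) : Decidable (Spec_chapter_targets_py total_words chapter_words out) := by unfold Spec_chapter_targets_py; infer_instance

-- ===== CLAIM (what is proved, stated in full; the proofs are below) =====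
def Claim_equal_chapter_targets_py : Prop := ∀ (total_words : Int) (chapter_words : Int), Dom_chapter_targets_py total_words chapter_words → Pre_chapter_targets_py total_words chapter_words → Spec_chapter_targets_py total_words chapter_words (chapter_targets_py total_words chapter_words)

-- ===== LEMMAS AND PROOFS =====

-- As long as a "short" positive step (0 < remaining - j*cw < cw) can only occur at the last index,
-- A's loop with its running `remaining` is `cw` repeated, followed by the closed-form last target.
theorem chapterLoopA_eq_rep (cw : Int) : ∀ (n : Nat) (rem : Int),
    (∀ j : Nat, j + 1 < n + 1 → ¬(0 < rem - (j : Int) * cw ∧ rem - (j : Int) * cw < cw)) →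
    chapterLoopA cw (n + 1) rem =
      List.replicate n cw ++
        [let m := min cw (rem - (n : Int) * cw); if m ≤ 0 then cw else m] := by
  intro n
  induction n with
  | zero =>
    intro rem _
    simp [chapterLoopA]
  | succ k ih =>
    intro rem h
    have hstep : chapterLoopA cw (k + 2) rem =
        (if min cw rem ≤ 0 then cw else min cw rem) ::
          chapterLoopA cw (k + 1) (rem - (if min cw rem ≤ 0 then cw else min cw rem)) := rfl
    have h0 := h 0 (by omega)
    simp only [Nat.cast_zero, Int.zero_mul, Int.sub_zero] at h0
    have htgt : (if min cw rem ≤ 0 then cw else min cw rem) = cw := by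
      simp only [min_def]; split_ifs <;> omega
    rw [hstep, htgt]
    have htail := ih (rem - cw) (by
      intro j hj hc
      have := h (j + 1) (by omega)
      push_cast at this ⊢
      exact this ⟨by linarith [hc.1], by linarith [hc.2]⟩)
    rw [htail]
    have harg : rem - cw - (k : Int) * cw = rem - ((k + 1 : Nat) : Int) * cw := by
      push_cast; ring
    rw [harg]
    simp [List.replicate_succ]

-- the short-step condition holds for n = chapter_count: before the last index, remaining ≥ cw
theorem chapter_targets_key (tw cw : Int) (hcw : cw ≠ 0) :
    ∀ j : Nat, j + 1 < ((max 1 (-(PySem.Int.floordiv (-tw) cw))).toNat) →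
      ¬(0 < tw - (j : Int) * cw ∧ tw - (j : Int) * cw < cw) := by
  intro j hj hc
  rcases lt_or_gt_of_ne hcw with hneg | hpos
  · omega
  · set c : Int := -(PySem.Int.floordiv (-tw) cw) with hcdef
    have hcle : (j : Int) + 2 ≤ max 1 c := by omega
    have hc2 : (j : Int) + 2 ≤ c := by
      rcases max_cases 1 c with ⟨he, hge⟩ | ⟨he, _⟩ <;> omega
    have hbrack : PySem.Int.floordiv (-tw) cw < -((j : Int) + 1) ↔ -tw < (-((j : Int) + 1)) * cw :=
      PySem.Int.floordiv_lt_iff_lt_mul hpos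
    have hlt : PySem.Int.floordiv (-tw) cw < -((j : Int) + 1) := by omega
    have := hbrack.mp hlt
    nlinarith [hc.2]

-- ===== VERDICT (by name: the statement is the Claim_ definition above) =====
theorem chapter_targets_py_spec : Claim_equal_chapter_targets_py := by
  intro tw cw _ hpre
  unfold Spec_chapter_targets_py chapter_targets_py chapter_targets_py_alt
  dsimp only
  set c : Int := max 1 (-(PySem.Int.floordiv (-tw) cw)) with hcdef
  have hc1 : 1 ≤ c := le_max_left _ _
  have hn : c.toNat = (c - 1).toNat + 1 := by omega
  rw [hn]
  have := chapterLoopA_eq_rep cw (c - 1).toNat tw (by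
    intro j hj
    exact chapter_targets_key tw cw hpre j (by omega))
  rw [this]
  have hcast2 : ((c.toNat - 1 : Nat) : Int) = c - 1 := by omega
  simp [hcast2]
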